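-- pv_equiv track=rewrite | github.com/yezin013/hzz_project | backend/services/chatbot/app/api/chatbot.py | reorder_by_ai_mentions
-- ===== SOURCE A (Python) =====
-- def reorder_by_ai_mentions(answer: str, drinks: list) -> list:
--     """
--     AI 응답에서 언급된 술을 최상단으로 이동.
--     Phase 1: AI-카드 불일치 해결.
--     """
--     mentioned = []
--     remaining = []
--
--     for drink in drinks:
--         if drink['name'] in answer:
--             mentioned.append(drink)
--         else:
--             remaining.append(drink)
--
--     # 언급된 술 + 나머지
--     return mentioned + remaining
-- ===== SOURCE B (Python) =====
-- def reorder_by_ai_mentions(answer: str, drinks: list) -> list: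
--     # Single stable sort on the membership boolean: mentioned drinks (key False)
--     # come first, each group keeping its original relative order (Timsort is stable).
--     return sorted(drinks, key=lambda drink: drink['name'] not in answer)
-- ===== Notes on version B (the rewrite author's own statement) =====
-- stated objective: idiomatic
-- what changed: Replaced the explicit two-accumulator partition with a single stable sort keyed on the membership boolean, relying on sort stability to keep each group's original order.
import Mathlib
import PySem

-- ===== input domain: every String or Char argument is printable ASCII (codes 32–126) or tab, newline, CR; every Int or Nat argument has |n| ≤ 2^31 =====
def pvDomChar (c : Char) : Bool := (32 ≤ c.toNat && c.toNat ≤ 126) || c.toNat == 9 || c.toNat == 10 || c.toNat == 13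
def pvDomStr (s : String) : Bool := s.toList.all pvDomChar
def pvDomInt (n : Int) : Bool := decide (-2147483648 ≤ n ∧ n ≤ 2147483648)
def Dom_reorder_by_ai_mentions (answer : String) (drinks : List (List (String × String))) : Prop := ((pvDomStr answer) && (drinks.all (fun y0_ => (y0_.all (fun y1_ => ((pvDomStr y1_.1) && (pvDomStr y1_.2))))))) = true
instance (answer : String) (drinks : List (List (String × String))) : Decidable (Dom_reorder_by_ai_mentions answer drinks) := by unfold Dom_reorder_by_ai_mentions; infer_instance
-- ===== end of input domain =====

-- B replaces A's explicit two-list partition by one stable sort on the membership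
-- boolean (mentioned drinks key False first, stability keeping each group's order).

-- ===== PORT A =====
-- A's loop: append each drink to 'mentioned' or 'remaining' by the substring test,
-- then return mentioned + remaining.  drink['name'] is Dict.getD under Pre_
-- (the key is present there; A raises KeyError otherwise).
def reorder_by_ai_mentions (answer : String) (drinks : List (List (String × String))) : List (List (String × String)) :=
  let p := drinks.foldl
    (fun (acc : List (List (String × String)) × List (List (String × String))) drink =>
      if PySem.Str.isIn (PySem.Dict.getD ⟨drink⟩ "name" "") answer then
        (acc.1 ++ [drink], acc.2)
      else
        (acc.1, acc.2 ++ [drink]))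
    ([], [])
  p.1 ++ p.2

-- ===== PORT B =====
-- sorted(drinks, key=lambda drink: drink['name'] not in answer)
def reorder_by_ai_mentions_alt (answer : String) (drinks : List (List (String × String))) : List (List (String × String)) :=
  PySem.List.sorted drinks
    (fun drink => !(PySem.Str.isIn (PySem.Dict.getD ⟨drink⟩ "name" "") answer)) false

-- ===== PRECONDITION & SPEC =====
-- Pre_ excludes exactly the inputs where some drink lacks the key 'name':
-- there Python A raises KeyError (and B's sort key raises it too).
def Pre_reorder_by_ai_mentions (answer : String) (drinks : List (List (String × String))) : Prop :=
  ∀ drink ∈ drinks, PySem.Dict.contains ⟨drink⟩ "name" = true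

instance (answer : String) (drinks : List (List (String × String))) : Decidable (Pre_reorder_by_ai_mentions answer drinks) := by unfold Pre_reorder_by_ai_mentions; infer_instance

def pvWitness_reorder_by_ai_mentions : String × (List (List (String × String))) :=
  ("I suggest soju tonight", [[("name", "wine")], [("name", "soju")], [("name", "beer")]])

def Spec_reorder_by_ai_mentions (answer : String) (drinks : List (List (String × String))) (out : List (List (String × String))) : Prop := out = reorder_by_ai_mentions_alt answer drinks
instance (answer : String) (drinks : List (List (String × String))) (out : List (List (String × String))) : Decidable (Spec_reorder_by_ai_mentions answer drinks out) := by unfold Spec_reorder_by_ai_mentions; infer_instance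

-- ===== CLAIM (what is proved, stated in full; the proofs are below) =====
def Claim_equal_reorder_by_ai_mentions : Prop := ∀ (answer : String) (drinks : List (List (String × String))), Dom_reorder_by_ai_mentions answer drinks → Pre_reorder_by_ai_mentions answer drinks → Spec_reorder_by_ai_mentions answer drinks (reorder_by_ai_mentions answer drinks)

-- ===== LEMMAS AND PROOFS =====

-- A's fold, from any pair of accumulators, appends the two filters.
theorem pv_foldA_eq {α : Type} (p : α → Bool) :
    ∀ (xs : List α) (m r : List α),
      xs.foldl (fun (acc : List α × List α) x =>
        if p x then (acc.1 ++ [x], acc.2) else (acc.1, acc.2 ++ [x])) (m, r)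
      = (m ++ xs.filter p, r ++ xs.filter (fun x => !p x)) := by
  intro xs
  induction xs with
  | nil => intro m r; simp
  | cons x xs ih =>
    intro m r
    by_cases h : p x = true
    · simp [List.foldl, h, ih]
    · simp at h
      simp [List.foldl, h, ih]

-- insertBy skips a prefix it never goes before.
theorem pv_insertBy_skip {α : Type} (before : α → α → Bool) (x : α) :
    ∀ (F T : List α), (∀ y ∈ F, before x y = false) →
      PySem.List.insertBy before x (F ++ T) = F ++ PySem.List.insertBy before x T := by
  intro F
  induction F with
  | nil => intro T _; simp
  | cons f fs ih =>
    intro T h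
    have hf : before x f = false := h f (by simp)
    simp [PySem.List.insertBy, hf, ih T (fun y hy => h y (by simp [hy]))]

-- insertBy prepends when it goes before the head (or the list is empty).
theorem pv_insertBy_head {α : Type} (before : α → α → Bool) (x : α) (T : List α)
    (h : ∀ y ∈ T, before x y = true) :
    PySem.List.insertBy before x T = x :: T := by
  cases T with
  | nil => simp [PySem.List.insertBy]
  | cons t ts => simp [PySem.List.insertBy, h t (by simp)]

-- insertBy appends when it never goes before anything.
theorem pv_insertBy_last {α : Type} (before : α → α → Bool) (x : α) :
    ∀ (T : List α), (∀ y ∈ T, before x y = false) →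
      PySem.List.insertBy before x T = T ++ [x] := by
  intro T
  induction T with
  | nil => intro _; simp [PySem.List.insertBy]
  | cons t ts ih =>
    intro h
    simp [PySem.List.insertBy, h t (by simp), ih (fun y hy => h y (by simp [hy]))]

-- Stable insertion sort on a boolean key is the partition by that key.
theorem pv_sort_bool_aux {α : Type} (key : α → Bool) :
    ∀ (xs F T : List α), (∀ y ∈ F, key y = false) → (∀ y ∈ T, key y = true) →
      xs.foldl (fun acc x => PySem.List.insertBy (fun a b => decide (key a < key b)) x acc) (F ++ T)
      = (F ++ xs.filter (fun x => !key x)) ++ (T ++ xs.filter key) := by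
  intro xs
  induction xs with
  | nil => intro F T _ _; simp
  | cons x xs ih =>
    intro F T hF hT
    by_cases hx : key x = true
    · have hstep : PySem.List.insertBy (fun a b => decide (key a < key b)) x (F ++ T)
          = (F ++ T) ++ [x] := by
        apply pv_insertBy_last
        intro y hy
        rcases List.mem_append.mp hy with h | h
        · simp [hF y h, hx]
        · simp [hT y h, hx]
      have := ih F (T ++ [x]) hF (by
        intro y hy
        rcases List.mem_append.mp hy with h | h
        · exact hT y h
        · simp at h; simp [h, hx])
      simp only [List.foldl, hstep, List.append_assoc] at this ⊢
      rw [this]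
      simp [List.filter, hx]
    · simp at hx
      have hstep : PySem.List.insertBy (fun a b => decide (key a < key b)) x (F ++ T)
          = (F ++ [x]) ++ T := by
        rw [pv_insertBy_skip _ _ F T (fun y hy => by simp [hF y hy, hx])]
        rw [pv_insertBy_head _ _ T (fun y hy => by simp [hT y hy, hx])]
        simp
      have := ih (F ++ [x]) T (by
        intro y hy
        rcases List.mem_append.mp hy with h | h
        · exact hF y h
        · simp at h; simp [h, hx]) hT
      simp only [List.foldl, hstep] at this ⊢
      rw [this]
      simp [List.filter, hx]

theorem pv_sorted_bool {α : Type} (key : α → Bool) (xs : List α) :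
    PySem.List.sorted xs key false = xs.filter (fun x => !key x) ++ xs.filter key := by
  have := pv_sort_bool_aux key xs [] [] (by simp) (by simp)
  simpa [PySem.List.sorted] using this

-- ===== VERDICT (by name: the statement is the Claim_ definition above) =====
theorem reorder_by_ai_mentions_spec : Claim_equal_reorder_by_ai_mentions := by
  intro answer drinks _ _
  unfold Spec_reorder_by_ai_mentions reorder_by_ai_mentions reorder_by_ai_mentions_alt
  rw [pv_sorted_bool, pv_foldA_eq (fun drink => PySem.Str.isIn (PySem.Dict.getD ⟨drink⟩ "name" "") answer) drinks [] []]
  simp
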